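-- pv_equiv track=rewrite | github.com/jcpaiva-fgpe/acf2aca8-8726-4f22-8bb5-07a4d4a59a85 | exercises/09aca459-a8ad-4b4d-9844-952c059683e1/solutions/9000a239-2fb9-4b98-aa7c-09e4f12c4da3/sol.py | maksimalus_kiekis
-- ===== SOURCE A (Python) =====
-- def maksimalus_kiekis( N: int ) :
--   ats = []
--   i = 1
--   while i+1 <= N-i:
--     ats.append( i )
--     N -= i
--     i += 1
--   if 0 < N:
--     ats.append( N )
--   return ats
-- ===== SOURCE B (Python) =====
-- import math
--
-- def maksimalus_kiekis(N: int):
--     if N < 1: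
--         return []
--     k = (math.isqrt(8 * N + 1) - 1) // 2
--     res = list(range(1, k + 1))
--     res[-1] += N - k * (k + 1) // 2
--     return res
-- ===== Notes on version B (the rewrite author's own statement) =====
-- stated objective: simpler
-- what changed: Replaces A's greedy subtraction loop (repeatedly append the next summand and subtract it) by a closed form: the summand count k is computed directly with math.isqrt, the list built as one range with the remainder folded into its last element.
import Mathlib
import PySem

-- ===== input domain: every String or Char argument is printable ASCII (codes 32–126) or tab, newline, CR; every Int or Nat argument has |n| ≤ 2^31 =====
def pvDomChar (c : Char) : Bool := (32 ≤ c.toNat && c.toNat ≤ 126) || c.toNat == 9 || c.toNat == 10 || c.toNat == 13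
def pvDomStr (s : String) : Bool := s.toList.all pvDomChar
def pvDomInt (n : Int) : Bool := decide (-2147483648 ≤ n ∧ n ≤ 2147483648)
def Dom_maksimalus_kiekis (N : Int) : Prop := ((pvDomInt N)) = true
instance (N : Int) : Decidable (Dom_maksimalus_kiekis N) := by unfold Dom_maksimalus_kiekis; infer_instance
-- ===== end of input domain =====

-- B replaces A's greedy subtraction loop by a closed-form summand count via math.isqrt.

-- ===== PORT A =====
-- while i+1 <= N-i: ats.append(i); N -= i; i += 1
def pvLoopA (N i : Int) : List Int :=
  if h : i + 1 ≤ N - i then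
    i :: pvLoopA (N - i) (i + 1)
  else
    if 0 < N then [N] else []
termination_by ((1 - i).toNat, (N - 2*i).toNat)
decreasing_by
  simp_wf
  by_cases hi : i ≤ 0
  · exact Prod.Lex.left _ _ (by omega)
  · have h2 : (-i).toNat = (1 - i).toNat := by omega
    rw [h2]
    exact Prod.Lex.right _ (by omega)

def maksimalus_kiekis (N : Int) : List Int := pvLoopA N 1

-- ===== PORT B =====
-- math.isqrt on a nonnegative argument = Int.sqrt; res[-1] += remainder ported as dropLast ++ [last + remainder]
def maksimalus_kiekis_alt (N : Int) : List Int :=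
  if N < 1 then []
  else
    let k : Int := (Int.sqrt (8 * N + 1) - 1) / 2
    let res : List Int := PySem.List.pyRange 1 (k + 1) 1
    let remainder : Int := N - k * (k + 1) / 2
    res.dropLast ++ [res.getLast! + remainder]

-- ===== PRECONDITION & SPEC =====
def Spec_maksimalus_kiekis (N : Int) (out : List Int) : Prop := out = maksimalus_kiekis_alt N
instance (N : Int) (out : List Int) : Decidable (Spec_maksimalus_kiekis N out) := by unfold Spec_maksimalus_kiekis; infer_instance

-- ===== CLAIM (what is proved, stated in full; the proofs are below) =====
def Claim_equal_maksimalus_kiekis : Prop := ∀ (N : Int), Dom_maksimalus_kiekis N → Spec_maksimalus_kiekis N (maksimalus_kiekis N)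

-- ===== LEMMAS AND PROOFS =====

-- sum of j for i ≤ j < k (the total subtracted by A's loop while appending i..k-1)
def pvS (i k : Int) : Int := ((PySem.List.pyRange i k 1).sum)

theorem pvS_stop (i k : Int) (h : k ≤ i) : pvS i k = 0 := by
  simp [pvS, PySem.List.pyRange_one_eq_nil h]

theorem pvS_cons (i k : Int) (h : i < k) : pvS i k = i + pvS (i+1) k := by
  unfold pvS
  rw [PySem.List.pyRange_one_cons h]
  simp

theorem pvS_nonneg (i k : Int) (hi : 0 ≤ i) : 0 ≤ pvS i k := by
  refine List.sum_nonneg ?_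
  intro x hx
  have := (PySem.List.mem_pyRange_one).1 hx
  omega

theorem pvS_closed (i k : Int) (hi : 0 ≤ i) (hik : i ≤ k) :
    2 * pvS i k = k * (k - 1) - i * (i - 1) := by
  induction' hk : (k - i).toNat with n ih generalizing i
  · rw [pvS_stop i k (by omega)]
    have : i = k := by omega
    subst this; ring
  · rw [pvS_cons i k (by omega)]
    have hih := ih (i+1) (by omega) (by omega) (by omega)
    linear_combination hih

-- unrolling lemmas for A's loop
theorem pvLoopA_step (N i : Int) (h : i + 1 ≤ N - i) :
    pvLoopA N i = i :: pvLoopA (N - i) (i + 1) := by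
  rw [pvLoopA]; rw [dif_pos h]

theorem pvLoopA_exit (N i : Int) (h : ¬ (i + 1 ≤ N - i)) :
    pvLoopA N i = if 0 < N then [N] else [] := by
  rw [pvLoopA]; rw [dif_neg h]

-- main characterisation of A's loop: starting at i it appends i..k-1 and then the remainder,
-- provided the loop condition holds up to k-1 and fails at k
theorem pvLoopA_closed (i k N : Int) (hi : 1 ≤ i) (hik : i ≤ k)
    (hrun : i < k → 2 * (k - 1) + 1 ≤ N - pvS i (k - 1))
    (hstop : N - pvS i k ≤ 2 * k) :
    pvLoopA N i = PySem.List.pyRange i k 1 ++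
      (if 0 < N - pvS i k then [N - pvS i k] else []) := by
  induction' hd : (k - i).toNat with n ih generalizing i N
  · have hik' : i = k := by omega
    subst hik'
    rw [pvS_stop i i (le_refl i)] at *
    rw [pvLoopA_exit N i (by omega), PySem.List.pyRange_one_eq_nil (le_refl i)]
    simp
  · have hlt : i < k := by omega
    have hScond := hrun hlt
    have hcond : i + 1 ≤ N - i := by
      by_cases hik1 : i < k - 1
      · have h1 := pvS_cons i (k-1) hik1
        have h2 := pvS_nonneg (i+1) (k-1) (by omega)
        omega
      · rw [pvS_stop i (k-1) (by omega)] at hScond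
        omega
    rw [pvLoopA_step N i hcond]
    have hSk : pvS i k = i + pvS (i+1) k := pvS_cons i k hlt
    have hSk1 : i < k - 1 → pvS i (k-1) = i + pvS (i+1) (k-1) := fun h => pvS_cons i (k-1) h
    have hih := ih (i+1) (N - i) (by omega) (by omega)
      (by intro h; have := hSk1 (by omega); omega)
      (by omega) (by omega)
    rw [hih, PySem.List.pyRange_one_cons hlt]
    have : N - i - pvS (i+1) k = N - pvS i k := by omega
    rw [this]
    simp

-- dropLast / getLast! of a one-step range
theorem pyRange_dropLast (a k : Int) (h : a ≤ k) :
    (PySem.List.pyRange a (k + 1) 1).dropLast = PySem.List.pyRange a k 1 := by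
  rw [PySem.List.pyRange_one_succ_right h]
  simp

theorem pyRange_getLast! (a k : Int) (h : a ≤ k) :
    (PySem.List.pyRange a (k + 1) 1).getLast! = k := by
  rw [PySem.List.pyRange_one_succ_right h]
  simp

-- bounds for Int.sqrt on a nonnegative argument
theorem int_sqrt_bounds (z : Int) (hz : 0 ≤ z) :
    Int.sqrt z * Int.sqrt z ≤ z ∧ z < (Int.sqrt z + 1) * (Int.sqrt z + 1) := by
  have h2 := Nat.sqrt_le' z.toNat
  have h3 := Nat.lt_succ_sqrt' z.toNat
  rw [pow_two] at h2
  rw [Nat.succ_eq_add_one, pow_two] at h3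
  have h2' : ((Nat.sqrt z.toNat : Int)) * (Nat.sqrt z.toNat) ≤ (z.toNat : Int) := by
    exact_mod_cast h2
  have h3' : (z.toNat : Int) < ((Nat.sqrt z.toNat : Int) + 1) * ((Nat.sqrt z.toNat : Int) + 1) := by
    exact_mod_cast h3
  rw [Int.toNat_of_nonneg hz] at h2' h3'
  exact ⟨h2', h3'⟩

-- k := (isqrt(8N+1)-1)//2 is the largest k with k(k+1) ≤ 2N
theorem k_bounds (N s k : Int) (hN : 1 ≤ N) (hs : s = Int.sqrt (8 * N + 1))
    (hk : k = (s - 1) / 2) :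
    1 ≤ k ∧ k * (k + 1) ≤ 2 * N ∧ 2 * N < (k + 1) * (k + 2) := by
  obtain ⟨hlo, hhi⟩ := int_sqrt_bounds (8 * N + 1) (by omega)
  rw [← hs] at hlo hhi
  have hsnn : 0 ≤ s := hs ▸ Int.sqrt_nonneg _
  have hs3 : 3 ≤ s := by nlinarith
  have hk1 : 2 * k + 1 ≤ s := by omega
  have hk2 : s ≤ 2 * k + 2 := by omega
  have hsq1 : (2 * k + 1) * (2 * k + 1) ≤ s * s :=
    mul_self_le_mul_self (by omega) hk1
  have hsq2 : (s + 1) * (s + 1) ≤ (2 * k + 3) * (2 * k + 3) :=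
    mul_self_le_mul_self (by omega) (by omega)
  refine ⟨by omega, by nlinarith, by nlinarith⟩

-- ===== VERDICT (by name: the statement is the Claim_ definition above) =====
theorem maksimalus_kiekis_spec : Claim_equal_maksimalus_kiekis := by
  intro N _
  unfold Spec_maksimalus_kiekis maksimalus_kiekis maksimalus_kiekis_alt
  by_cases hN : N < 1
  · rw [pvLoopA_exit N 1 (by omega), if_neg (by omega : ¬ 0 < N), if_pos hN]
  · replace hN : 1 ≤ N := by omega
    rw [if_neg (by omega : ¬ N < 1)]
    set s := Int.sqrt (8 * N + 1) with hs
    set k := (s - 1) / 2 with hkdef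
    obtain ⟨hk1, hlo, hhi⟩ := k_bounds N s k hN hs hkdef
    have hS1k : 2 * pvS 1 k = k * (k - 1) := by
      have := pvS_closed 1 k (by omega) hk1
      linarith
    obtain ⟨m, hm⟩ := Int.even_mul_succ_self k
    have hm' : k * (k + 1) = 2 * m := by omega
    have hrel : k * (k + 1) = k * (k - 1) + 2 * k := by ring
    have hrem : N - pvS 1 k = k + (N - k * (k + 1) / 2) := by omega
    have hmain := pvLoopA_closed 1 k N (le_refl 1) hk1
      (by
        intro hlt
        have hS : 2 * pvS 1 (k - 1) = (k - 1) * (k - 2) := by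
          have := pvS_closed 1 (k - 1) (by omega) (by omega)
          linarith
        have : k * (k + 1) = (k - 1) * (k - 2) + 4 * k - 2 := by ring
        omega)
      (by
        have : (k + 1) * (k + 2) = k * (k - 1) + 4 * k + 2 := by ring
        omega)
    have hpos : 0 < N - pvS 1 k := by omega
    rw [hmain, if_pos hpos]
    show PySem.List.pyRange 1 k 1 ++ [N - pvS 1 k] =
      (PySem.List.pyRange 1 (k + 1) 1).dropLast ++
        [(PySem.List.pyRange 1 (k + 1) 1).getLast! + (N - k * (k + 1) / 2)]
    rw [pyRange_dropLast 1 k hk1, pyRange_getLast! 1 k hk1, hrem]
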